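-- pv_equiv track=rewrite | github.com/SignariusV/Bookbot | services/file_handling.py | _get_part_text
-- ===== SOURCE A (Python) =====
-- def _get_part_text(text: str, start: int, size: int) -> tuple[str, int]:
--     stop = start + size
--     if len(text) <= stop:
--         page = text[start:]
--     else:
--         for i in range(stop-1, start,-1):
--             if text[i] in ',.!:;?':
--                 if text[i+1] in ',.!:;?':
--                     continue
--                 page = text[start:i + 1]
--                 break
--     return page, len(page)
-- ===== SOURCE B (Python) =====
-- def _get_part_text(text: str, start: int, size: int) -> tuple[str, int]:
--     stop = start + size
--     if len(text) <= stop: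
--         page = text[start:]
--     else:
--         window = text[start:stop + 1]
--         cut = None
--         for j in range(1, len(window) - 1):
--             if window[j] in ',.!:;?' and window[j + 1] not in ',.!:;?':
--                 cut = j
--         page = window[:cut + 1]
--     return page, len(page)
-- ===== Notes on version B (the rewrite author's own statement) =====
-- stated objective: alternative
-- what changed: A scans the window backwards from the right and breaks at the first standalone punctuation; B slices the window out once, scans it forwards keeping the LAST qualifying offset in an accumulator, and cuts the page from that offset.
-- outside the precondition, e.g. on _get_part_text('a,b', -3, 2): A returns ('a,', 2), B raises TypeError
import Mathlib
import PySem

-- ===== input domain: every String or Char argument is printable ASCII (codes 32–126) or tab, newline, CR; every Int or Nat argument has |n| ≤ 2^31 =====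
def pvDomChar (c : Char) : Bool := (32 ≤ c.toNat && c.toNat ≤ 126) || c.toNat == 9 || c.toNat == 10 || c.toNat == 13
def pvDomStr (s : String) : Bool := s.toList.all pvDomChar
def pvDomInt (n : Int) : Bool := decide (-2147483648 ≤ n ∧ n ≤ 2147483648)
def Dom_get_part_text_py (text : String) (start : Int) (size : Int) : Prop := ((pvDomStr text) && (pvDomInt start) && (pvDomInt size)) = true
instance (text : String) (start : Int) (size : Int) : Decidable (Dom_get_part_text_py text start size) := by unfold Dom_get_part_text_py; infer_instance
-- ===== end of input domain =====

-- B re-implements the else-branch by slicing the window out once and scanning it FORWARDS,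
-- keeping the last qualifying offset, instead of A's backward scan with early break ('alternative';
-- same exact return value on Pre_).

-- ===== PORT A =====
def pvPunct (c : Char) : Bool :=
  c == ',' || c == '.' || c == '!' || c == ':' || c == ';' || c == '?'

-- the 'for i in range(stop-1, start, -1)' loop with its break (indices in range under Pre_)
def pvFindBreak (L : List Char) (start : Int) : List Int → Option (List Char)
  | [] => none
  | i :: rest =>
    if pvPunct (PySem.List.pyGetD L i ' ') then
      if pvPunct (PySem.List.pyGetD L (i + 1) ' ') then pvFindBreak L start rest
      else some (PySem.List.slice L (some start) (some (i + 1)))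
    else pvFindBreak L start rest

def get_part_text_py (text : String) (start : Int) (size : Int) : String × Int :=
  let L := text.toList
  let stop := start + size
  if (L.length : Int) ≤ stop then
    let page := PySem.List.slice L (some start) none
    (String.ofList page, (page.length : Int))
  else
    match pvFindBreak L start (PySem.List.pyRange (stop - 1) start (-1)) with
    | some page => (String.ofList page, (page.length : Int))
    | none => ("", 0)   -- Python raises UnboundLocalError here (excluded by Pre_)

-- ===== PORT B =====
def get_part_text_py_alt (text : String) (start : Int) (size : Int) : String × Int :=
  let L := text.toList
  let stop := start + size
  if (L.length : Int) ≤ stop then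
    let page := PySem.List.slice L (some start) none
    (String.ofList page, (page.length : Int))
  else
    let window := PySem.List.slice L (some start) (some (stop + 1))
    let cut := (PySem.List.pyRange 1 ((window.length : Int) - 1) 1).foldl
      (fun acc j =>
        if pvPunct (PySem.List.pyGetD window j ' ') &&
           !pvPunct (PySem.List.pyGetD window (j + 1) ' ')
        then some j else acc) none
    match cut with
    | some j =>
      let page := PySem.List.slice window none (some (j + 1))
      (String.ofList page, (page.length : Int))
    | none => ("", 0)   -- Python raises TypeError here (excluded by Pre_)

-- ===== PRECONDITION & SPEC =====
-- Pre_ excludes the inputs where A raises (no qualifying punctuation in the window: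
-- UnboundLocalError; out-of-range negative-index reads: IndexError) and restricts the
-- search branch to the natural domain 0 ≤ start, where Python's negative-index
-- wraparound quirks cannot fire although A happens to return on a few such inputs.
def Pre_get_part_text_py (text : String) (start : Int) (size : Int) : Prop :=
  ((text.toList.length : Int) ≤ start + size) ∨
  (0 ≤ start ∧
   (PySem.List.pyRange (start + 1) (start + size) 1).any
     (fun i => pvPunct (PySem.List.pyGetD text.toList i ' ') &&
               !pvPunct (PySem.List.pyGetD text.toList (i + 1) ' ')) = true)
instance (text : String) (start : Int) (size : Int) : Decidable (Pre_get_part_text_py text start size) := by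
  unfold Pre_get_part_text_py; infer_instance

def pvWitness_get_part_text_py : String × Int × Int := ("a, b", 0, 3)

def Spec_get_part_text_py (text : String) (start : Int) (size : Int) (out : String × Int) : Prop := out = get_part_text_py_alt text start size
instance (text : String) (start : Int) (size : Int) (out : String × Int) : Decidable (Spec_get_part_text_py text start size out) := by unfold Spec_get_part_text_py; infer_instance

-- ===== CLAIM (what is proved, stated in full; the proofs are below) =====
def Claim_equal_get_part_text_py : Prop := ∀ (text : String) (start : Int) (size : Int), Dom_get_part_text_py text start size → Pre_get_part_text_py text start size → Spec_get_part_text_py text start size (get_part_text_py text start size)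

-- ===== LEMMAS AND PROOFS =====

-- A's loop returns at the FIRST index of its (descending) list satisfying Q.
theorem pvFindBreak_eq_find? (L : List Char) (start : Int) (l : List Int) :
    pvFindBreak L start l =
      (l.find? (fun i => pvPunct (PySem.List.pyGetD L i ' ') &&
                         !pvPunct (PySem.List.pyGetD L (i + 1) ' '))).map
        (fun i => PySem.List.slice L (some start) (some (i + 1))) := by
  induction l with
  | nil => rfl
  | cons i rest ih =>
    simp only [pvFindBreak, List.find?_cons]
    by_cases h1 : pvPunct (PySem.List.pyGetD L i ' ') <;>
      by_cases h2 : pvPunct (PySem.List.pyGetD L (i + 1) ' ') <;>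
      simp [h1, h2, ih]

-- B's accumulator loop keeps the LAST index satisfying Q' = the first of the reversed list.
theorem foldl_last_eq_find?_reverse {α : Type} (Q : α → Bool) (l : List α) (acc : Option α) :
    l.foldl (fun acc j => if Q j then some j else acc) acc =
      ((l.reverse.find? Q).or acc) := by
  induction l generalizing acc with
  | nil => rfl
  | cons a rest ih =>
    simp only [List.foldl_cons, List.reverse_cons, List.find?_append, ih]
    cases hf : rest.reverse.find? Q with
    | none =>
      simp only [Option.none_or, List.find?_singleton]
      split <;> simp
    | some j => simp

-- find? only looks at the predicate's values on the list's members
theorem pv_find?_congr_mem {α : Type} {p q : α → Bool} {l : List α}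
    (h : ∀ a ∈ l, p a = q a) : l.find? p = l.find? q := by
  induction l with
  | nil => rfl
  | cons a rest ih =>
    simp only [List.find?_cons, h a (by simp)]
    split
    · rfl
    · exact ih (fun b hb => h b (by simp [hb]))

-- reading the window at offset j is reading the text at index start + j
theorem pv_window_get (L : List Char) (start j : Int) (z : Nat)
    (h0 : 0 ≤ start) (hj : 0 ≤ j) (hjz : j < (z : Int) + 1)
    (hn : start + (z : Int) + 1 ≤ (L.length : Int)) :
    PySem.List.pyGetD ((L.drop start.toNat).take (z + 1)) j ' ' =
      PySem.List.pyGetD L (start + j) ' ' := by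
  have hW : ((L.drop start.toNat).take (z + 1)).length = z + 1 := by
    simp only [List.length_take, List.length_drop]
    omega
  rw [PySem.List.pyGetD_eq_getElem _ _ hj (by rw [hW]; push_cast; omega),
      PySem.List.pyGetD_eq_getElem _ _ (by omega) (by omega)]
  rw [List.getElem_take, List.getElem_drop]
  congr 1
  omega

-- ===== VERDICT (by name: the statement is the Claim_ definition above) =====
theorem get_part_text_py_spec : Claim_equal_get_part_text_py := by
  intro text start size _ hPre
  unfold Spec_get_part_text_py get_part_text_py get_part_text_py_alt
  dsimp only
  by_cases hb : ((text.toList.length : Int) ≤ start + size)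
  · rw [if_pos hb, if_pos hb]
  · have h0 : 0 ≤ start := by
      rcases hPre with h | ⟨h0, _⟩
      · exact absurd h hb
      · exact h0
    rw [if_neg hb, if_neg hb]
    rw [not_le] at hb
    have hany : (PySem.List.pyRange (start + 1) (start + size) 1).any
        (fun i => pvPunct (PySem.List.pyGetD text.toList i ' ') &&
                  !pvPunct (PySem.List.pyGetD text.toList (i + 1) ' ')) = true := by
      rcases hPre with h | ⟨_, hany⟩
      · exact absurd h (by omega)
      · exact hany
    have hsz : 1 < size := by
      rcases List.any_eq_true.mp hany with ⟨i, hi, _⟩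
      rw [PySem.List.mem_pyRange_one] at hi
      omega
    set L := text.toList with hLdef
    set z := size.toNat with hzdef
    have hz : (z : Int) = size := by omega
    have hw : PySem.List.slice L (some start) (some (start + size + 1))
        = (L.drop start.toNat).take (z + 1) := by
      rw [PySem.List.slice_of_nonneg L h0 (by omega) (by omega) (by omega)]
      congr 1
      omega
    have hwlen : ((L.drop start.toNat).take (z + 1)).length = z + 1 := by
      simp only [List.length_take, List.length_drop]
      omega
    rw [hw, hwlen]
    have hwl1 : ((z + 1 : Nat) : Int) - 1 = size := by omega
    rw [hwl1]
    rw [pvFindBreak_eq_find?, PySem.List.pyRange_neg_one_eq_reverse]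
    have e1 : start + size - 1 + 1 = start + size := by ring
    rw [e1]
    rw [foldl_last_eq_find?_reverse
      (fun j => pvPunct (PySem.List.pyGetD ((L.drop start.toNat).take (z + 1)) j ' ') &&
                !pvPunct (PySem.List.pyGetD ((L.drop start.toNat).take (z + 1)) (j + 1) ' '))]
    have hmap : PySem.List.pyRange (start + 1) (start + size) 1
        = (PySem.List.pyRange 1 size 1).map (fun j => start + j) := by
      rw [PySem.List.pyRange_one, PySem.List.pyRange_one, List.map_map]
      have e2 : start + size - (start + 1) = size - 1 := by ring
      rw [e2]
      refine List.map_congr_left (fun k _ => ?_)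
      simp only [Function.comp_apply]
      ring
    rw [hmap, ← List.map_reverse, List.find?_map]
    have hcongr : (PySem.List.pyRange 1 size 1).reverse.find?
          ((fun i => pvPunct (PySem.List.pyGetD L i ' ') &&
                     !pvPunct (PySem.List.pyGetD L (i + 1) ' ')) ∘ (fun j => start + j))
        = (PySem.List.pyRange 1 size 1).reverse.find?
          (fun j => pvPunct (PySem.List.pyGetD ((L.drop start.toNat).take (z + 1)) j ' ') &&
                    !pvPunct (PySem.List.pyGetD ((L.drop start.toNat).take (z + 1)) (j + 1) ' ')) := by
      refine pv_find?_congr_mem (fun j hj => ?_)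
      rw [List.mem_reverse, PySem.List.mem_pyRange_one] at hj
      simp only [Function.comp_apply]
      rw [pv_window_get L start j z h0 (by omega) (by omega) (by omega),
          pv_window_get L start (j + 1) z h0 (by omega) (by omega) (by omega)]
      have e3 : start + (j + 1) = start + j + 1 := by ring
      rw [e3]
    rw [hcongr]
    cases hF : (PySem.List.pyRange 1 size 1).reverse.find?
        (fun j => pvPunct (PySem.List.pyGetD ((L.drop start.toNat).take (z + 1)) j ' ') &&
                  !pvPunct (PySem.List.pyGetD ((L.drop start.toNat).take (z + 1)) (j + 1) ' ')) with
    | none => simp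
    | some j =>
      have hjmem : j ∈ (PySem.List.pyRange 1 size 1).reverse := List.mem_of_find?_eq_some hF
      rw [List.mem_reverse, PySem.List.mem_pyRange_one] at hjmem
      simp only [Option.map_some]
      have hpage : PySem.List.slice L (some start) (some (start + j + 1))
          = PySem.List.slice ((L.drop start.toNat).take (z + 1)) none (some (j + 1)) := by
        rw [PySem.List.slice_to _ (by omega : (0:Int) ≤ j + 1),
            PySem.List.slice_of_nonneg L h0 (by omega) (by omega) (by omega),
            List.take_take]
        congr 1
        omega
      rw [hpage]
      rfl
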